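-- pv_equiv track=rewrite | github.com/ankitkumarpansari/chroma-gtm | hubspot_master_sync.py | deduplicate_companies
-- ===== SOURCE A (Python) =====
-- from typing import Optional, Dict, List, Set
--
-- SOURCE_PRIORITY = {
--     "product_signup": 10,
--     "chroma_signal": 8,
--     "deep_research": 7,
--     "competitor_customer": 6,
--     "linkedin_sales_nav": 5,
--     "ai_speakers": 4,
--     "dormant_user": 3,
-- }
--
-- def deduplicate_companies(companies: List[dict]) -> List[dict]:
--     """Deduplicate companies, keeping highest priority source."""
--     seen = {}  # domain/name -> company data
--
--     for company in companies:
--         domain = company.get("domain", "").lower().strip()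
--         name = company.get("name", "").lower().strip()
--         source = company.get("source_type", "")
--         priority = SOURCE_PRIORITY.get(source, 0)
--
--         key = domain if domain else name
--         if not key:
--             continue
--
--         if key in seen:
--             existing_priority = SOURCE_PRIORITY.get(seen[key].get("source_type", ""), 0)
--             if priority > existing_priority:
--                 # Merge data, keeping new as primary
--                 merged = {**seen[key], **company}
--                 seen[key] = merged
--             else:
--                 # Merge data, keeping existing as primary
--                 for k, v in company.items():
--                     if v and not seen[key].get(k):
--                         seen[key][k] = v
--         else:
--             seen[key] = company
--
--     return list(seen.values())
-- ===== SOURCE B (Python) =====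
-- SOURCE_PRIORITY = {
--     "product_signup": 10,
--     "chroma_signal": 8,
--     "deep_research": 7,
--     "competitor_customer": 6,
--     "linkedin_sales_nav": 5,
--     "ai_speakers": 4,
--     "dormant_user": 3,
-- }
--
--
-- def _merge(acc, company):
--     """Fold one company into the group's accumulator (A's merge rule)."""
--     new_p = SOURCE_PRIORITY.get(company.get("source_type", ""), 0)
--     old_p = SOURCE_PRIORITY.get(acc.get("source_type", ""), 0)
--     if new_p > old_p:
--         return {**acc, **company}
--     for k, v in company.items():
--         if v and not acc.get(k):
--             acc[k] = v
--     return acc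
--
--
-- def deduplicate_companies(companies):
--     """Two passes: group companies by key in input order, then reduce each group."""
--     groups = {}
--     for company in companies:
--         domain = company.get("domain", "").lower().strip()
--         name = company.get("name", "").lower().strip()
--         key = domain if domain else name
--         if not key:
--             continue
--         if key in groups:
--             groups[key].append(company)
--         else:
--             groups[key] = [company]
--     result = []
--     for grp in groups.values():
--         acc = grp[0]
--         for c in grp[1:]:
--             acc = _merge(acc, c)
--         result.append(acc)
--     return result
-- ===== Notes on version B (the rewrite author's own statement) =====
-- stated objective: alternative
-- what changed: B replaces A's single pass over an evolving seen-dict with two passes: it first groups the companies by their domain/name key in input order, then reduces each group with the same merge step, returning the reduced accumulators in first-seen key order.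
import Mathlib
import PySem

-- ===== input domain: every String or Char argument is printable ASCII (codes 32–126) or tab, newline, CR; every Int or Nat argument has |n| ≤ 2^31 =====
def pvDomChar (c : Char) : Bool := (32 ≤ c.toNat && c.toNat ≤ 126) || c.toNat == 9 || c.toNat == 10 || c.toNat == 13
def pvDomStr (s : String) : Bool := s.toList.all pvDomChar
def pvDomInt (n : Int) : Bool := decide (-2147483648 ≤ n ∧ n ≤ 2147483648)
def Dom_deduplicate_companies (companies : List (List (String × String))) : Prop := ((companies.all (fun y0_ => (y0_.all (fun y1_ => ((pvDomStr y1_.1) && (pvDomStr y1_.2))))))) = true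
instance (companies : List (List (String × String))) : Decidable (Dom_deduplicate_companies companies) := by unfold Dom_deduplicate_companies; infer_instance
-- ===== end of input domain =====

-- B regroups the input into per-key lists first and then reduces each group with the
-- merge step, instead of A's single pass over an evolving seen-dict (objective:
-- alternative decomposition, same cost). A mutates the input dicts in its fill
-- branch; the equivalence proved here is about the RETURN value only (B mutates too).

def pvSP : PySem.Dict String Int :=
  PySem.Dict.ofList [("product_signup", 10), ("chroma_signal", 8), ("deep_research", 7),
    ("competitor_customer", 6), ("linkedin_sales_nav", 5), ("ai_speakers", 4), ("dormant_user", 3)]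

-- ===== PORT A =====
-- one iteration of A's `for company in companies` loop over the `seen` dict
def pvStepA (seen : PySem.Dict String (PySem.Dict String String))
    (company0 : List (String × String)) : PySem.Dict String (PySem.Dict String String) :=
  let company := PySem.Dict.ofList company0
  let domain := PySem.Str.strip (PySem.Str.lower (company.getD "domain" ""))
  let name := PySem.Str.strip (PySem.Str.lower (company.getD "name" ""))
  let source := company.getD "source_type" ""
  let priority := pvSP.getD source 0
  let key := if domain ≠ "" then domain else name
  if key = "" then seen
  else if seen.contains key then
    let existing := seen.getD key PySem.Dict.empty
    let existing_priority := pvSP.getD (existing.getD "source_type" "") 0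
    if priority > existing_priority then
      -- merged = {**seen[key], **company}
      seen.insert key (company.items.foldl (fun d kv => d.insert kv.1 kv.2) existing)
    else
      -- for k, v in company.items(): if v and not seen[key].get(k): seen[key][k] = v
      seen.insert key (company.items.foldl
        (fun d kv => if kv.2 ≠ "" ∧ (d.get? kv.1).getD "" = "" then d.insert kv.1 kv.2 else d)
        existing)
  else seen.insert key company

def deduplicate_companies (companies : List (List (String × String))) : List (List (String × String)) :=
  ((companies.foldl pvStepA PySem.Dict.empty).values).map (fun d => d.items)

-- ===== PORT B =====
-- _merge(acc, company) from Source B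
def pvMerge (acc company : PySem.Dict String String) : PySem.Dict String String :=
  let new_p := pvSP.getD (company.getD "source_type" "") 0
  let old_p := pvSP.getD (acc.getD "source_type" "") 0
  if new_p > old_p then
    company.items.foldl (fun d kv => d.insert kv.1 kv.2) acc
  else
    company.items.foldl
      (fun d kv => if kv.2 ≠ "" ∧ (d.get? kv.1).getD "" = "" then d.insert kv.1 kv.2 else d)
      acc

-- one iteration of Source B's grouping loop
def pvStepB (groups : PySem.Dict String (List (PySem.Dict String String)))
    (company0 : List (String × String)) : PySem.Dict String (List (PySem.Dict String String)) :=
  let company := PySem.Dict.ofList company0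
  let domain := PySem.Str.strip (PySem.Str.lower (company.getD "domain" ""))
  let name := PySem.Str.strip (PySem.Str.lower (company.getD "name" ""))
  let key := if domain ≠ "" then domain else name
  if key = "" then groups
  else if groups.contains key then groups.insert key (groups.getD key [] ++ [company])
  else groups.insert key [company]

-- Source B's inner reduce loop: acc = grp[0]; for c in grp[1:]: acc = _merge(acc, c)
-- (headD supplies a value on [], which the grouping never produces — totality guard only)
def pvRed (grp : List (PySem.Dict String String)) : PySem.Dict String String :=
  grp.tail.foldl pvMerge (grp.headD PySem.Dict.empty)

def deduplicate_companies_alt (companies : List (List (String × String))) : List (List (String × String)) :=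
  ((companies.foldl pvStepB PySem.Dict.empty).values).map (fun grp => (pvRed grp).items)

-- ===== PRECONDITION & SPEC =====
def Spec_deduplicate_companies (companies : List (List (String × String))) (out : List (List (String × String))) : Prop := out = deduplicate_companies_alt companies
instance (companies : List (List (String × String))) (out : List (List (String × String))) : Decidable (Spec_deduplicate_companies companies out) := by unfold Spec_deduplicate_companies; infer_instance

-- ===== CLAIM (what is proved, stated in full; the proofs are below) =====
def Claim_equal_deduplicate_companies : Prop := ∀ (companies : List (List (String × String))), Dom_deduplicate_companies companies → Spec_deduplicate_companies companies (deduplicate_companies companies)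

-- ===== LEMMAS AND PROOFS =====

-- the value-side transform relating B's groups to A's seen dict
def pvTf (p : String × List (PySem.Dict String String)) : String × PySem.Dict String String :=
  (p.1, pvRed p.2)

-- loop invariant tying A's seen to B's groups
def pvInv (seen : PySem.Dict String (PySem.Dict String String))
    (groups : PySem.Dict String (List (PySem.Dict String String))) : Prop :=
  seen.items = groups.items.map pvTf ∧ (∀ p ∈ groups.items, p.2 ≠ []) ∧ groups.keys.Nodup

theorem pvRed_append_singleton (v : List (PySem.Dict String String)) (hv : v ≠ [])
    (c : PySem.Dict String String) : pvRed (v ++ [c]) = pvMerge (pvRed v) c := by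
  cases v with
  | nil => exact absurd rfl hv
  | cons h t => simp [pvRed, List.foldl_append]

theorem pvStep_core (seen : PySem.Dict String (PySem.Dict String String))
    (groups : PySem.Dict String (List (PySem.Dict String String)))
    (company : PySem.Dict String String) (key : String)
    (hit : seen.items = groups.items.map pvTf)
    (hne : ∀ p ∈ groups.items, p.2 ≠ []) (hnd : groups.keys.Nodup) :
    pvInv
      (if key = "" then seen
       else if seen.contains key then
         if pvSP.getD (company.getD "source_type" "") 0 >
             pvSP.getD ((seen.getD key PySem.Dict.empty).getD "source_type" "") 0 then
           seen.insert key
             (company.items.foldl (fun d kv => d.insert kv.1 kv.2) (seen.getD key PySem.Dict.empty))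
         else
           seen.insert key
             (company.items.foldl
               (fun d kv => if kv.2 ≠ "" ∧ (d.get? kv.1).getD "" = "" then d.insert kv.1 kv.2 else d)
               (seen.getD key PySem.Dict.empty))
       else seen.insert key company)
      (if key = "" then groups
       else if groups.contains key then groups.insert key (groups.getD key [] ++ [company])
       else groups.insert key [company]) := by
  have hkeys : seen.keys = groups.keys := by
    simp only [PySem.Dict.keys, hit, List.map_map]
    rfl
  have hcont : seen.contains key = groups.contains key := by
    rw [PySem.Dict.contains_eq_decide_mem_keys, PySem.Dict.contains_eq_decide_mem_keys, hkeys]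
  by_cases hk0 : key = ""
  · simp only [hk0, if_pos]
    exact ⟨hit, hne, hnd⟩
  · simp only [if_neg hk0, hcont]
    by_cases hc : groups.contains key
    · simp only [hc, if_pos]
      -- the stored group and its reduction
      have hsome : ∃ v, groups.get? key = some v := by
        have := PySem.Dict.contains_eq_isSome_get? (d := groups) (k := key)
        rw [hc] at this
        exact Option.isSome_iff_exists.mp this.symm
      obtain ⟨v, hv⟩ := hsome
      have hmemg : (key, v) ∈ groups.items := PySem.Dict.mem_items_of_get?_eq_some _ hv
      have hvne : v ≠ [] := hne _ hmemg
      have hgetg : groups.getD key [] = v := PySem.Dict.getD_of_get?_eq_some _ _ hv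
      have hmems : (key, pvRed v) ∈ seen.items := by
        rw [hit]
        exact List.mem_map.mpr ⟨(key, v), hmemg, rfl⟩
      have hnds : seen.keys.Nodup := by rw [hkeys]; exact hnd
      have hgets : seen.getD key PySem.Dict.empty = pvRed v :=
        PySem.Dict.getD_of_mem_items _ hmems hnds _
      have hconts : seen.contains key = true := by rw [hcont]; exact hc
      rw [hgetg, hgets]
      have hmrg :
          (if pvSP.getD (company.getD "source_type" "") 0 >
              pvSP.getD ((pvRed v).getD "source_type" "") 0 then
            company.items.foldl (fun d kv => d.insert kv.1 kv.2) (pvRed v)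
          else
            company.items.foldl
              (fun d kv => if kv.2 ≠ "" ∧ (d.get? kv.1).getD "" = "" then d.insert kv.1 kv.2 else d)
              (pvRed v)) = pvMerge (pvRed v) company := rfl
      rw [← apply_ite (seen.insert key), hmrg]
      refine ⟨?_, ?_, ?_⟩
      · rw [PySem.Dict.items_insert_of_contains _ _ hconts,
          PySem.Dict.items_insert_of_contains _ _ hc, hit, List.map_map, List.map_map]
        apply List.map_congr_left
        intro p hp
        by_cases hpk : p.1 == key
        · simp only [Function.comp_apply, pvTf, hpk, if_true]
          exact congrArg (Prod.mk key) (pvRed_append_singleton v hvne company).symm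
        · have hpk' : (p.1 == key) = false := by simpa using hpk
          simp [Function.comp, pvTf, hpk']
      · intro p hp
        rw [PySem.Dict.items_insert_of_contains _ _ hc] at hp
        obtain ⟨q, hq, rfl⟩ := List.mem_map.mp hp
        by_cases hqk : (q.1 == key) = true
        · simp [hqk]
        · have hqk' : (q.1 == key) = false := by simpa using hqk
          simp only [hqk', Bool.false_eq_true, if_false]
          exact hne _ hq
      · rw [PySem.Dict.keys_insert_of_contains _ _ hc]
        exact hnd
    · have hc' : groups.contains key = false := by simpa using hc
      have hconts : seen.contains key = false := by rw [hcont]; exact hc'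
      simp only [hc', Bool.false_eq_true, if_false]
      refine ⟨?_, ?_, ?_⟩
      · rw [PySem.Dict.items_insert_of_not_contains _ _ hconts,
          PySem.Dict.items_insert_of_not_contains _ _ hc', hit, List.map_append]
        rfl
      · intro p hp
        rw [PySem.Dict.items_insert_of_not_contains _ _ hc'] at hp
        rcases List.mem_append.mp hp with h1 | h1
        · exact hne _ h1
        · simp only [List.mem_singleton] at h1
          subst h1; simp
      · rw [PySem.Dict.keys_insert_of_not_contains _ _ hc']
        refine List.Nodup.append hnd (List.nodup_singleton _) ?_
        intro a ha hb
        simp only [List.mem_singleton] at hb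
        rw [hb] at ha
        have hmem : groups.contains key = true := by
          rw [PySem.Dict.contains_eq_decide_mem_keys]
          simpa using ha
        rw [hc'] at hmem
        cases hmem

theorem pvA_eq (seen : PySem.Dict String (PySem.Dict String String)) (c : List (String × String)) :
    pvStepA seen c =
      (let company := PySem.Dict.ofList c
       let key := if PySem.Str.strip (PySem.Str.lower (company.getD "domain" "")) ≠ "" then
           PySem.Str.strip (PySem.Str.lower (company.getD "domain" ""))
         else PySem.Str.strip (PySem.Str.lower (company.getD "name" ""))
       if key = "" then seen
       else if seen.contains key then
         if pvSP.getD (company.getD "source_type" "") 0 >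
             pvSP.getD ((seen.getD key PySem.Dict.empty).getD "source_type" "") 0 then
           seen.insert key
             (company.items.foldl (fun d kv => d.insert kv.1 kv.2) (seen.getD key PySem.Dict.empty))
         else
           seen.insert key
             (company.items.foldl
               (fun d kv => if kv.2 ≠ "" ∧ (d.get? kv.1).getD "" = "" then d.insert kv.1 kv.2 else d)
               (seen.getD key PySem.Dict.empty))
       else seen.insert key company) := rfl

theorem pvB_eq (groups : PySem.Dict String (List (PySem.Dict String String)))
    (c : List (String × String)) :
    pvStepB groups c =
      (let company := PySem.Dict.ofList c
       let key := if PySem.Str.strip (PySem.Str.lower (company.getD "domain" "")) ≠ "" then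
           PySem.Str.strip (PySem.Str.lower (company.getD "domain" ""))
         else PySem.Str.strip (PySem.Str.lower (company.getD "name" ""))
       if key = "" then groups
       else if groups.contains key then groups.insert key (groups.getD key [] ++ [company])
       else groups.insert key [company]) := rfl

theorem pvStep_inv (seen : PySem.Dict String (PySem.Dict String String))
    (groups : PySem.Dict String (List (PySem.Dict String String)))
    (c : List (String × String)) (h : pvInv seen groups) :
    pvInv (pvStepA seen c) (pvStepB groups c) := by
  obtain ⟨hit, hne, hnd⟩ := h
  rw [pvA_eq, pvB_eq]
  exact pvStep_core seen groups (PySem.Dict.ofList c) _ hit hne hnd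

theorem pvFold_inv (cs : List (List (String × String)))
    (seen : PySem.Dict String (PySem.Dict String String))
    (groups : PySem.Dict String (List (PySem.Dict String String))) (h : pvInv seen groups) :
    pvInv (cs.foldl pvStepA seen) (cs.foldl pvStepB groups) := by
  induction cs generalizing seen groups with
  | nil => exact h
  | cons c rest ih =>
    rw [List.foldl_cons, List.foldl_cons]
    exact ih _ _ (pvStep_inv seen groups c h)

-- ===== VERDICT (by name: the statement is the Claim_ definition above) =====
theorem deduplicate_companies_spec : Claim_equal_deduplicate_companies := by
  intro companies _
  unfold Spec_deduplicate_companies deduplicate_companies deduplicate_companies_alt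
  have hemp : (PySem.Dict.empty : PySem.Dict String (List (PySem.Dict String String))).items
      = [] := rfl
  have hinv : pvInv PySem.Dict.empty PySem.Dict.empty := by
    unfold pvInv
    refine ⟨rfl, ?_, ?_⟩
    · intro p hp
      rw [hemp] at hp
      cases hp
    · rw [PySem.Dict.keys, hemp]
      exact List.nodup_nil
  obtain ⟨hit, -, -⟩ := pvFold_inv companies PySem.Dict.empty PySem.Dict.empty hinv
  simp only [PySem.Dict.values, hit, List.map_map]
  rfl
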